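-- pv_equiv track=rewrite | github.com/ljvmiranda921/LiBERTus | scripts/fill_orv_empty_tokens.py | fix_tokens
-- ===== SOURCE A (Python) =====
-- import copy
-- from typing import Any, List, Optional
--
-- TASK_TO_EMPTY_PREDS = {
--     "lemmatisation": ["", ["", "", ""]],
--     "morph_features": {"Form": "", "UPOS": ""},
--     "pos_tagging": ["", ""],
-- }
--
-- def fix_tokens(pred: List[Any], task: str, ref_tokens: List[str]) -> List[Any]:
--     # Get indices where empty tokens show up
--     empty_idxs = [idx for idx, token, in enumerate(ref_tokens) if token == ""]
--
--     def _insert_at_idx(idx: int, value: Any, target: List[Any]) -> List[Any]: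
--         _target = target[:idx]
--         _target.append(value)
--         _target.extend(target[idx:])
--         return _target
--
--     new_pred = copy.copy(pred)
--     for empty_idx in empty_idxs:
--         new_pred = _insert_at_idx(
--             empty_idx, value=TASK_TO_EMPTY_PREDS[task], target=new_pred
--         )
--     return new_pred
-- ===== SOURCE B (Python) =====
-- from typing import Any, List
--
-- TASK_TO_EMPTY_PREDS = {
--     "lemmatisation": ["", ["", "", ""]],
--     "morph_features": {"Form": "", "UPOS": ""},
--     "pos_tagging": ["", ""],
-- }
--
-- def fix_tokens(pred: List[Any], task: str, ref_tokens: List[str]) -> List[Any]: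
--     # Single merge pass: walk ref_tokens once, emitting the placeholder at each
--     # empty reference token and otherwise the next prediction, then append the
--     # leftover predictions.  O(n + k) instead of one O(n) list rebuild per empty token.
--     out: List[Any] = []
--     i = 0
--     for token in ref_tokens:
--         if token == "":
--             out.append(TASK_TO_EMPTY_PREDS[task])
--         elif i < len(pred):
--             out.append(pred[i])
--             i += 1
--     out.extend(pred[i:])
--     return out
-- ===== Notes on version B (the rewrite author's own statement) =====
-- stated objective: faster
-- what changed: Replaces the fold of per-index list-rebuilding insertions (one slice-copy of the whole list per empty token) by a single merge pass over ref_tokens that interleaves predictions with placeholders in one traversal.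
import Mathlib
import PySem

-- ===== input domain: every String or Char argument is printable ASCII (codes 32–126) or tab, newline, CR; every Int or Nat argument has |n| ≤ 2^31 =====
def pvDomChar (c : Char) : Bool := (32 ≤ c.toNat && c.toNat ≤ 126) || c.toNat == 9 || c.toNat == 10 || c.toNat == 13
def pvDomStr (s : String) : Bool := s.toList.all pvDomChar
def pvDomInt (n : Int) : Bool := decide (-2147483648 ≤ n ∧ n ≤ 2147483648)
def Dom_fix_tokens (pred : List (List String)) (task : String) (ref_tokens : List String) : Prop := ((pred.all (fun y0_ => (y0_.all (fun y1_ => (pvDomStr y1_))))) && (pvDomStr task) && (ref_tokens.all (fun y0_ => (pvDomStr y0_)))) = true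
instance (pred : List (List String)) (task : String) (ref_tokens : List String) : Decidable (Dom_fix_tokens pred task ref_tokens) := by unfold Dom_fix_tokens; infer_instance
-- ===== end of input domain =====

-- B replaces A's fold of per-index list-rebuilding insertions by a single merge pass
-- over ref_tokens (objective: faster).

-- The module constant TASK_TO_EMPTY_PREDS, restricted to the only entry whose value is a
-- List String ("pos_tagging" -> ["", ""]); Pre_ restricts task to exactly that key.
-- Shared by both ports (it is a module-level constant in both Pythons).
def taskToEmptyPreds (task : String) : List String :=
  if task = "pos_tagging" then ["", ""] else []

-- ===== PORT A =====
-- _insert_at_idx: target[:idx] + [value] + target[idx:]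
def insert_at_idx (idx : Int) (value : List String) (target : List (List String)) : List (List String) :=
  PySem.List.slice target none (some idx) ++ value :: PySem.List.slice target (some idx) none

def fix_tokens (pred : List (List String)) (task : String) (ref_tokens : List String) : List (List String) :=
  let empty_idxs : List Int :=
    (PySem.List.enumerate ref_tokens 0).filterMap (fun p => if p.2 = "" then some p.1 else none)
  empty_idxs.foldl (fun new_pred empty_idx => insert_at_idx empty_idx (taskToEmptyPreds task) new_pred) pred

-- ===== PORT B =====
-- the merge pass of Source B: recursion over ref_tokens, consuming pred (the index i)
def mergeFill (pred : List (List String)) (ref : List String) (ph : List String) : List (List String) :=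
  match ref with
  | [] => pred            -- out.extend(pred[i:])
  | r :: rs =>
    if r = "" then ph :: mergeFill pred rs ph
    else
      match pred with
      | [] => mergeFill [] rs ph
      | p :: ps => p :: mergeFill ps rs ph

def fix_tokens_alt (pred : List (List String)) (task : String) (ref_tokens : List String) : List (List String) :=
  mergeFill pred ref_tokens (taskToEmptyPreds task)

-- ===== PRECONDITION & SPEC =====
-- Pre_ excludes inputs where some reference token is empty and the task is not "pos_tagging":
-- there A returns a placeholder (a nested list / a dict for the other two tasks) that is not a
-- value of the declared List (List String) type, or raises KeyError for an unknown task; the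
-- Python B behaves identically to A on all of these excluded inputs.
def Pre_fix_tokens (pred : List (List String)) (task : String) (ref_tokens : List String) : Prop :=
  task = "pos_tagging" ∨ ¬ ("" ∈ ref_tokens)
instance (pred : List (List String)) (task : String) (ref_tokens : List String) : Decidable (Pre_fix_tokens pred task ref_tokens) := by unfold Pre_fix_tokens; infer_instance

def pvWitness_fix_tokens : List (List String) × String × List String :=
  ([["a", "b"], ["c", "d"]], "pos_tagging", ["x", "", "y"])

def Spec_fix_tokens (pred : List (List String)) (task : String) (ref_tokens : List String) (out : List (List String)) : Prop := out = fix_tokens_alt pred task ref_tokens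
instance (pred : List (List String)) (task : String) (ref_tokens : List String) (out : List (List String)) : Decidable (Spec_fix_tokens pred task ref_tokens out) := by unfold Spec_fix_tokens; infer_instance

-- ===== CLAIM (what is proved, stated in full; the proofs are below) =====
def Claim_equal_fix_tokens : Prop := ∀ (pred : List (List String)) (task : String) (ref_tokens : List String), Dom_fix_tokens pred task ref_tokens → Pre_fix_tokens pred task ref_tokens → Spec_fix_tokens pred task ref_tokens (fix_tokens pred task ref_tokens)

-- ===== LEMMAS AND PROOFS =====

-- the empty-token indices of ref, in ascending order
def eIdxs : List String → List Int
  | [] => []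
  | r :: rs => if r = "" then 0 :: (eIdxs rs).map (· + 1) else (eIdxs rs).map (· + 1)

lemma eIdxs_nonneg : ∀ (xs : List String), ∀ i ∈ eIdxs xs, 0 ≤ i := by
  intro xs
  induction xs with
  | nil => intro i h; simp [eIdxs] at h
  | cons r rs ih =>
    intro i h
    simp only [eIdxs] at h
    split at h
    · rcases List.mem_cons.1 h with h | h
      · omega
      · obtain ⟨j, hj, rfl⟩ := List.mem_map.1 h
        have := ih j hj; omega
    · obtain ⟨j, hj, rfl⟩ := List.mem_map.1 h
      have := ih j hj; omega

lemma filterMap_enumerate (xs : List String) (s : Int) :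
    (PySem.List.enumerate xs s).filterMap (fun p => if p.2 = "" then some p.1 else none)
      = (eIdxs xs).map (· + s) := by
  induction xs generalizing s with
  | nil => simp [PySem.List.enumerate_nil, eIdxs]
  | cons r rs ih =>
    by_cases hr : r = ""
    · simp [PySem.List.enumerate_cons, eIdxs, hr, ih (s + 1), List.map_map]
      intro a _; omega
    · simp [PySem.List.enumerate_cons, eIdxs, hr, ih (s + 1), List.map_map]
      intro a _; omega

lemma insert_shift (i : Int) (hi : 0 ≤ i) (ph : List String) (a : List String)
    (t : List (List String)) :
    insert_at_idx (i + 1) ph (a :: t) = a :: insert_at_idx i ph t := by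
  obtain ⟨n, rfl⟩ := Int.eq_ofNat_of_zero_le hi
  unfold insert_at_idx
  rw [show ((n : Int) + 1) = ((n + 1 : Nat) : Int) by push_cast; ring]
  rw [PySem.List.slice_to_natCast, PySem.List.slice_from_natCast,
      PySem.List.slice_to_natCast, PySem.List.slice_from_natCast]
  simp [List.take_succ_cons, List.drop_succ_cons]

lemma insert_zero (ph : List String) (t : List (List String)) :
    insert_at_idx 0 ph t = ph :: t := by
  unfold insert_at_idx
  rw [show (0 : Int) = ((0 : Nat) : Int) from rfl]
  rw [PySem.List.slice_to_natCast, PySem.List.slice_from_natCast]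
  simp

lemma fold_shift (ph : List String) (idxs : List Int) (h : ∀ i ∈ idxs, 0 ≤ i)
    (a : List String) (t : List (List String)) :
    (idxs.map (· + 1)).foldl (fun acc i => insert_at_idx i ph acc) (a :: t)
      = a :: idxs.foldl (fun acc i => insert_at_idx i ph acc) t := by
  induction idxs generalizing t with
  | nil => rfl
  | cons i is ih =>
    simp only [List.map_cons, List.foldl_cons]
    rw [insert_shift i (h i (List.mem_cons_self)) ph a t]
    exact ih (fun j hj => h j (List.mem_cons_of_mem _ hj)) _

lemma insert_replicate (i : Int) (hi : 0 ≤ i) (ph : List String) (k : Nat) :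
    insert_at_idx i ph (List.replicate k ph) = List.replicate (k + 1) ph := by
  unfold insert_at_idx
  rw [PySem.List.slice_to _ hi, PySem.List.slice_from _ hi,
      List.take_replicate, List.drop_replicate]
  apply List.eq_replicate_iff.2
  constructor
  · simp; omega
  · intro b hb
    rcases List.mem_append.1 hb with hb | hb
    · exact List.eq_of_mem_replicate hb
    · rcases List.mem_cons.1 hb with rfl | hb
      · rfl
      · exact List.eq_of_mem_replicate hb

lemma fold_replicate (ph : List String) (idxs : List Int) (h : ∀ i ∈ idxs, 0 ≤ i) (k : Nat) :
    idxs.foldl (fun acc i => insert_at_idx i ph acc) (List.replicate k ph)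
      = List.replicate (k + idxs.length) ph := by
  induction idxs generalizing k with
  | nil => simp
  | cons i is ih =>
    simp only [List.foldl_cons, List.length_cons]
    rw [insert_replicate i (h i (List.mem_cons_self)) ph k,
        ih (fun j hj => h j (List.mem_cons_of_mem _ hj)) (k + 1)]
    congr 1
    omega

lemma merge_nil (ph : List String) (rs : List String) :
    mergeFill [] rs ph = List.replicate (eIdxs rs).length ph := by
  induction rs with
  | nil => rfl
  | cons r rs ih =>
    simp only [mergeFill, eIdxs]
    by_cases hr : r = ""
    · simp [hr, ih, List.replicate_succ]
    · simp [hr, ih]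

lemma fold_eq_merge (ph : List String) (ref : List String) (pred : List (List String)) :
    (eIdxs ref).foldl (fun acc i => insert_at_idx i ph acc) pred = mergeFill pred ref ph := by
  induction ref generalizing pred with
  | nil => rfl
  | cons r rs ih =>
    by_cases hr : r = ""
    · simp only [eIdxs, mergeFill, hr, if_pos, List.foldl_cons, insert_zero]
      rw [fold_shift ph (eIdxs rs) (eIdxs_nonneg rs) ph pred, ih]
    · simp only [eIdxs, mergeFill, if_neg hr]
      match pred with
      | p :: ps =>
        rw [fold_shift ph (eIdxs rs) (eIdxs_nonneg rs) p ps, ih]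
      | [] =>
        have hnn : ∀ i ∈ (eIdxs rs).map (· + 1), 0 ≤ i := by
          intro i hi
          obtain ⟨j, hj, rfl⟩ := List.mem_map.1 hi
          have := eIdxs_nonneg rs j hj; omega
        have h0 : ([] : List (List String)) = List.replicate 0 ph := rfl
        rw [h0, fold_replicate ph _ hnn 0]
        simp [merge_nil]

-- ===== VERDICT (by name: the statement is the Claim_ definition above) =====
theorem fix_tokens_spec : Claim_equal_fix_tokens := by
  intro pred task ref_tokens _ _
  unfold Spec_fix_tokens fix_tokens fix_tokens_alt
  rw [filterMap_enumerate ref_tokens 0]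
  simp only [Int.add_zero, List.map_id']
  exact fold_eq_merge _ ref_tokens pred
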